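-- pv_equiv track=rewrite | github.com/OH-JOO-YEONG/codingame | chucknorris.py | chuck_norris_encoding
-- ===== SOURCE A (Python) =====
-- def chuck_norris_encoding(codes):
--     previous_bit = ""
--     answer = ""
--     for bit in codes:
--         if bit != previous_bit:
--             if bit == "1":
--                 answer += " 0 "
--             else:
--                 answer += " 00 "
--         answer += "0"
--         previous_bit = bit
--     return answer[1:]
-- ===== SOURCE B (Python) =====
-- def chuck_norris_encoding(codes):
--     blocks = []
--     i = 0
--     n = len(codes)
--     while i < n:
--         j = i + 1
--         while j < n and codes[j] == codes[i]:
--             j += 1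
--         blocks.append(("0" if codes[i] == "1" else "00") + " " + "0" * (j - i))
--         i = j
--     return " ".join(blocks)
-- ===== Notes on version B (the rewrite author's own statement) =====
-- stated objective: simpler
-- what changed: B scans the input with a two-pointer loop that extracts maximal runs of identical characters, builds one block per run, and joins the blocks with a single-space separator, instead of A's character-at-a-time pass that maintains a previous-bit flag and strips the leading space at the end.
import Mathlib
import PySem

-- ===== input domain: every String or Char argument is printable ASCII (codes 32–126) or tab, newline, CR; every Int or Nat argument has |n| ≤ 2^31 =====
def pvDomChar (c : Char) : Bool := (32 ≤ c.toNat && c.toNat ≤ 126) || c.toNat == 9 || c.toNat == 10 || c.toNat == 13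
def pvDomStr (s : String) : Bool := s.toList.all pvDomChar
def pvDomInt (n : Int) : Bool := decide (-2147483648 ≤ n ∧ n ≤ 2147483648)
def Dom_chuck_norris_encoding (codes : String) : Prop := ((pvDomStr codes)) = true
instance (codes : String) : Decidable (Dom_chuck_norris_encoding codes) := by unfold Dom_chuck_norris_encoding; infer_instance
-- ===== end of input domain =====

-- B groups the input into maximal runs and joins one block per run; A keeps a previous-bit flag and
-- strips the leading space — same output, simpler decomposition (objective: simpler).

-- ===== PORT A =====
-- one loop step of A: previous_bit and answer as lists of chars ("" = [])
def pvStepA (st : List Char × List Char) (bit : Char) : List Char × List Char :=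
  let ans := if [bit] ≠ st.1 then
      (if bit = '1' then st.2 ++ (" 0 ".toList) else st.2 ++ (" 00 ".toList))
    else st.2
  ([bit], ans ++ ['0'])

def chuck_norris_encoding (codes : String) : String :=
  -- answer[1:] on a Python str is exactly List.drop 1 on its characters (also for the empty string)
  String.mk (((codes.toList.foldl pvStepA ([], [])).2).drop 1)

-- ===== PORT B =====
-- length of the maximal prefix of s consisting of copies of c (the inner while loop of Source B)
def pvRunLen (c : Char) : List Char → Nat
  | [] => 0
  | x :: xs => if x = c then 1 + pvRunLen c xs else 0

theorem pvRunLen_le (c : Char) (l : List Char) : pvRunLen c l ≤ l.length := by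
  induction l with
  | nil => simp [pvRunLen]
  | cons x xs ih => simp only [pvRunLen]; split <;> simp <;> omega

-- Source B's recursive `blocks`: one block per maximal run
def pvBlocks : List Char → List (List Char)
  | [] => []
  | c :: rest =>
    let n := 1 + pvRunLen c rest
    ((if c = '1' then "0".toList else "00".toList) ++ [' '] ++ List.replicate n '0')
      :: pvBlocks (rest.drop (pvRunLen c rest))
termination_by l => l.length
decreasing_by
  have := pvRunLen_le c rest
  simp only [List.length_drop, List.length_cons]
  omega

def chuck_norris_encoding_alt (codes : String) : String :=
  String.mk (PySem.Chars.join [' '] (pvBlocks codes.toList))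

-- ===== PRECONDITION & SPEC =====
def Spec_chuck_norris_encoding (codes : String) (out : String) : Prop := out = chuck_norris_encoding_alt codes
instance (codes : String) (out : String) : Decidable (Spec_chuck_norris_encoding codes out) := by unfold Spec_chuck_norris_encoding; infer_instance

-- ===== CLAIM (what is proved, stated in full; the proofs are below) =====
def Claim_equal_chuck_norris_encoding : Prop := ∀ (codes : String), Dom_chuck_norris_encoding codes → Spec_chuck_norris_encoding codes (chuck_norris_encoding codes)

-- ===== LEMMAS AND PROOFS =====

-- A's fold accumulates the answer on the right
theorem foldA_acc (l : List Char) : ∀ p a,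
    (l.foldl pvStepA (p, a)).2 = a ++ (l.foldl pvStepA (p, [])).2 := by
  induction l with
  | nil => intro p a; simp
  | cons x xs ih =>
    intro p a
    have key : ∀ (q b : List Char) (x : Char),
        pvStepA (q, b) x = ([x], b ++ (pvStepA (q, []) x).2) := by
      intro q b x
      simp only [pvStepA]
      split_ifs <;> simp
    simp only [List.foldl_cons]
    rw [key p a x, key p [] x, ih [x], ih [x] ([] ++ (pvStepA (p, []) x).2)]
    simp

-- delta of A's fold, starting from prev = p with empty accumulator
def pvA (p : List Char) (l : List Char) : List Char := (l.foldl pvStepA (p, [])).2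

theorem pvA_nil (p : List Char) : pvA p [] = [] := rfl

theorem pvA_cons (p : List Char) (x : Char) (xs : List Char) :
    pvA p (x :: xs) = (if [x] ≠ p then
        (if x = '1' then " 0 ".toList else " 00 ".toList) else []) ++ ['0'] ++ pvA [x] xs := by
  simp only [pvA, List.foldl_cons, pvStepA]
  by_cases h : [x] = p <;> simp [h] <;> rw [foldA_acc] <;> simp

-- within a run of c, A emits one '0' per character; at the run's end the previous-bit flag
-- behaves as if it were reset (the next char differs from c anyway)
theorem pvA_run (rest : List Char) : ∀ c : Char,
    pvA [c] rest = List.replicate (pvRunLen c rest) '0' ++ pvA [] (rest.drop (pvRunLen c rest)) := by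
  induction rest with
  | nil => intro c; simp [pvRunLen, pvA_nil]
  | cons x xs ih =>
    intro c
    by_cases h : x = c
    · subst h
      rw [pvA_cons]
      simp only [pvRunLen]
      rw [ih x]
      simp [List.replicate_succ, Nat.add_comm 1 (pvRunLen x xs)]
    · simp only [pvRunLen, if_neg h, List.replicate_zero, List.drop_zero, List.nil_append]
      rw [pvA_cons, pvA_cons]
      have h1 : [x] ≠ [c] := by simp [h]
      simp [h1]

-- main invariant: A's raw answer is the blocks of B, each preceded by one space
theorem pvA_blocks (l : List Char) :
    pvA [] l = (pvBlocks l).flatMap (fun b => ' ' :: b) := by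
  have main : ∀ (n : Nat) (l : List Char), l.length ≤ n →
      pvA [] l = (pvBlocks l).flatMap (fun b => ' ' :: b) := by
    intro n
    induction n with
    | zero =>
      intro l hl
      have : l = [] := by cases l <;> simp_all
      simp [this, pvA_nil, pvBlocks]
    | succ n ih =>
      intro l hl
      cases l with
      | nil => simp [pvA_nil, pvBlocks]
      | cons c rest =>
        rw [pvA_cons, pvA_run, pvBlocks]
        rw [ih (rest.drop (pvRunLen c rest)) (by
          have := pvRunLen_le c rest
          simp only [List.length_drop]
          simp only [List.length_cons] at hl
          omega)]
        by_cases h : c = '1' <;>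
          simp [h, List.flatMap_cons, Nat.add_comm 1, List.replicate_succ]
  exact main l.length l le_rfl

-- dropping the leading space of the flatMap gives the ' '-join of the blocks
theorem drop_flatMap_join (bs : List (List Char)) :
    (bs.flatMap (fun b => ' ' :: b)).drop 1 = PySem.Chars.join [' '] bs := by
  induction bs with
  | nil => simp [PySem.Chars.join_nil]
  | cons b bs ih =>
    cases bs with
    | nil => simp [PySem.Chars.join_singleton]
    | cons b' bs' =>
      rw [PySem.Chars.join_cons_cons, ← ih]
      simp [List.flatMap_cons]

-- ===== VERDICT (by name: the statement is the Claim_ definition above) =====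
theorem chuck_norris_encoding_spec : Claim_equal_chuck_norris_encoding := by
  intro codes _
  unfold Spec_chuck_norris_encoding chuck_norris_encoding chuck_norris_encoding_alt
  have : (codes.toList.foldl pvStepA ([], [])).2 = pvA [] codes.toList := rfl
  rw [this, pvA_blocks, drop_flatMap_join]
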